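-- pv_equiv track=rewrite | github.com/jjoshua2/arc_agi | dupes/ce22a75a_group-057/test_correct/1566.py | transform
-- ===== SOURCE A (Python) =====
-- def transform(grid: list[list[int]]) -> list[list[int]]:
--     rows = len(grid)
--     cols = len(grid[0])
--
--     # Create output grid with same dimensions as input, filled with 0s
--     output = [[0] * cols for _ in range(rows)]
--
--     # For each grey cell (color 5), place a 3x3 blue block (color 1) centered at that position
--     for i in range(rows):
--         for j in range(cols):
--             if grid[i][j] == 5:
--                 # Place 3x3 block centered at (i,j)
--                 for di in [-1, 0, 1]:
--                     for dj in [-1, 0, 1]: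
--                         ni, nj = i + di, j + dj
--                         if 0 <= ni < rows and 0 <= nj < cols:
--                             output[ni][nj] = 1
--
--     return output
-- ===== SOURCE B (Python) =====
-- def transform(grid: list[list[int]]) -> list[list[int]]:
--     rows = len(grid)
--     cols = len(grid[0])
--     # Gather: each output cell is 1 iff some grey (5) cell lies in its 3x3 neighborhood.
--     return [
--         [1 if any(grid[i][j] == 5
--                   for i in range(max(ni - 1, 0), min(ni + 2, rows))
--                   for j in range(max(nj - 1, 0), min(nj + 2, cols)))
--          else 0
--          for nj in range(cols)]
--         for ni in range(rows)
--     ]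
-- ===== Notes on version B (the rewrite author's own statement) =====
-- stated objective: idiomatic
-- what changed: Replaces A's scatter (mutating a zero grid with a 3x3 block pushed out from each grey cell) with a gather comprehension: each output cell is computed directly as 1 iff a grey cell lies in its clipped 3x3 neighborhood, with no mutable output grid.
import Mathlib
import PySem

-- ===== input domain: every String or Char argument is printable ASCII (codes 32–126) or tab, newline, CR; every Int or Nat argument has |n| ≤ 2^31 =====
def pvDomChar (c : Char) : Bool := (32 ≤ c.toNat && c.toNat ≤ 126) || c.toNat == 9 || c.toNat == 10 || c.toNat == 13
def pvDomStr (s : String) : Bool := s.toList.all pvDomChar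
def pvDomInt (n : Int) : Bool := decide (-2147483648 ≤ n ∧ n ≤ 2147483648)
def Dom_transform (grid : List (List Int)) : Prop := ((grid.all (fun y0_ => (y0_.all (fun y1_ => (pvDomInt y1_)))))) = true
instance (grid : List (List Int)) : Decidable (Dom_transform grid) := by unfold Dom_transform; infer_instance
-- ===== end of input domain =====

-- B paints by gathering (each cell looks for a grey neighbor) instead of A's scatter into a
-- mutable zero grid; same cost, no mutation — 'idiomatic' objective, no speed claim.

-- ===== PORT A =====
-- output[ni][nj] = 1 (indices in range by the guard); List.modify/List.set are exact for in-range indices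
def pvSet1 (g : List (List Int)) (p : Nat × Nat) : List (List Int) :=
  g.modify p.1 (fun row => row.set p.2 1)

def transform (grid : List (List Int)) : List (List Int) :=
  let rows := grid.length
  let cols := (grid.head?.getD []).length
  let output := (List.range rows).map (fun _ => List.replicate cols (0 : Int))
  (List.range rows).foldl (fun out i =>
    (List.range cols).foldl (fun out j =>
      -- grid[i][j]: i < rows, j < cols; exact under Pre_ (every row has ≥ cols entries)
      if (grid.getD i []).getD j 0 = 5 then
        ([-1, 0, 1] : List Int).foldl (fun out di =>
          ([-1, 0, 1] : List Int).foldl (fun out dj =>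
            let ni : Int := (i : Int) + di
            let nj : Int := (j : Int) + dj
            if 0 ≤ ni ∧ ni < (rows : Int) ∧ 0 ≤ nj ∧ nj < (cols : Int) then
              pvSet1 out (ni.toNat, nj.toNat)
            else out) out) out
      else out) out) output

-- ===== PORT B =====
-- range(max(ni-1,0), min(ni+2,rows)) = List.range' (ni-1) (min (ni+2) rows - (ni-1)) (Nat subtraction clamps at 0, exactly max)
def transform_alt (grid : List (List Int)) : List (List Int) :=
  let rows := grid.length
  let cols := (grid.head?.getD []).length
  (List.range rows).map (fun ni =>
    (List.range cols).map (fun nj =>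
      if (List.range' (ni - 1) (min (ni + 2) rows - (ni - 1))).any (fun i =>
           (List.range' (nj - 1) (min (nj + 2) cols - (nj - 1))).any (fun j =>
             (grid.getD i []).getD j 0 == 5))
      then (1 : Int) else 0))

-- ===== PRECONDITION & SPEC =====
-- Pre_ excludes exactly the inputs where Python A raises IndexError: the empty grid (grid[0])
-- and grids with a row shorter than the first row (grid[i][j] for j < cols).
def Pre_transform (grid : List (List Int)) : Prop :=
  grid ≠ [] ∧ ∀ row ∈ grid, (grid.head?.getD []).length ≤ row.length
instance (grid : List (List Int)) : Decidable (Pre_transform grid) := by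
  unfold Pre_transform; infer_instance
def pvWitness_transform : List (List Int) := [[5, 0], [0, 0]]

def Spec_transform (grid : List (List Int)) (out : List (List Int)) : Prop := out = transform_alt grid
instance (grid : List (List Int)) (out : List (List Int)) : Decidable (Spec_transform grid out) := by unfold Spec_transform; infer_instance

-- ===== CLAIM (what is proved, stated in full; the proofs are below) =====
def Claim_equal_transform : Prop := ∀ (grid : List (List Int)), Dom_transform grid → Pre_transform grid → Spec_transform grid (transform grid)

-- ===== LEMMAS AND PROOFS =====

def pvEnt (g : List (List Int)) (a b : Nat) : Int := (g.getD a []).getD b 0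

def pvApply (ps : List (Nat × Nat)) (g : List (List Int)) : List (List Int) :=
  ps.foldl pvSet1 g

def pvNbrs (rows cols i j : Nat) : List (Nat × Nat) :=
  ([-1, 0, 1] : List Int).flatMap (fun di =>
    ([-1, 0, 1] : List Int).filterMap (fun dj =>
      if 0 ≤ (i : Int) + di ∧ (i : Int) + di < (rows : Int) ∧
         0 ≤ (j : Int) + dj ∧ (j : Int) + dj < (cols : Int) then
        some (((i : Int) + di).toNat, ((j : Int) + dj).toNat)
      else none))

def pvPos (grid : List (List Int)) : List (Nat × Nat) :=
  (List.range grid.length).flatMap (fun i =>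
    (List.range (grid.head?.getD []).length).flatMap (fun j =>
      if pvEnt grid i j = 5 then pvNbrs grid.length (grid.head?.getD []).length i j else []))

def pvZeros (grid : List (List Int)) : List (List Int) :=
  (List.range grid.length).map (fun _ => List.replicate (grid.head?.getD []).length (0 : Int))

-- shape preservation
theorem pv_len_set1 (g : List (List Int)) (p : Nat × Nat) : (pvSet1 g p).length = g.length := by
  simp [pvSet1]

theorem pv_rowlen_set1 (g : List (List Int)) (p : Nat × Nat) (a : Nat) :
    ((pvSet1 g p).getD a []).length = (g.getD a []).length := by
  unfold pvSet1
  rw [List.getD_eq_getElem?_getD, List.getD_eq_getElem?_getD, List.getElem?_modify]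
  by_cases h : p.1 = a
  · simp only [h]
    cases g[a]? <;> simp
  · simp [h]

theorem pv_ent_set1 (g : List (List Int)) (p : Nat × Nat) (a b : Nat) :
    pvEnt (pvSet1 g p) a b =
      if p.1 = a ∧ p.2 = b ∧ a < g.length ∧ b < (g.getD a []).length then 1 else pvEnt g a b := by
  unfold pvEnt pvSet1
  rw [List.getD_eq_getElem?_getD, List.getD_eq_getElem?_getD, List.getElem?_modify]
  by_cases h1 : p.1 = a
  · cases hg : g[a]? with
    | none =>
      have hlen : g.length ≤ a := List.getElem?_eq_none_iff.mp hg
      rw [if_neg (by rintro ⟨-, -, h, -⟩; omega)]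
      simp [hg, List.getD_eq_getElem?_getD]
    | some row =>
      have ha : a < g.length := by
        by_contra h
        rw [List.getElem?_eq_none_iff.mpr (by omega)] at hg; cases hg
      have hrow : g.getD a [] = row := by simp [List.getD_eq_getElem?_getD, hg]
      simp only [h1, if_true, Option.map_eq_map, Option.map_some, Option.getD_some, hrow,
        true_and]
      rw [List.getElem?_set]
      by_cases h2 : p.2 = b
      · subst h2
        by_cases hb : p.2 < row.length
        · simp [hb, ha]
        · have hn : row[p.2]? = none := List.getElem?_eq_none_iff.mpr (by omega)
          simp [hb, ha, List.getD_eq_getElem?_getD]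
      · simp [h2, List.getD_eq_getElem?_getD]
  · simp [h1, List.getD_eq_getElem?_getD]

theorem pv_len_apply (ps : List (Nat × Nat)) (g : List (List Int)) :
    (pvApply ps g).length = g.length := by
  induction ps generalizing g with
  | nil => rfl
  | cons p t ih => simp [pvApply, List.foldl_cons] at *; rw [ih, pv_len_set1]

theorem pv_rowlen_apply (ps : List (Nat × Nat)) (g : List (List Int)) (a : Nat) :
    ((pvApply ps g).getD a []).length = (g.getD a []).length := by
  induction ps generalizing g with
  | nil => rfl
  | cons p t ih => simp only [pvApply, List.foldl_cons] at *; rw [ih, pv_rowlen_set1]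

theorem pv_ent_apply (ps : List (Nat × Nat)) (g : List (List Int)) (a b : Nat) :
    pvEnt (pvApply ps g) a b =
      if (a, b) ∈ ps ∧ a < g.length ∧ b < (g.getD a []).length then 1 else pvEnt g a b := by
  induction ps generalizing g with
  | nil => simp [pvApply]
  | cons p t ih =>
    simp only [pvApply, List.foldl_cons] at *
    rw [ih, pv_len_set1, pv_rowlen_set1, pv_ent_set1]
    split_ifs with h1 h2 h3 h4 h5 <;> try rfl
    all_goals simp only [List.mem_cons, Prod.ext_iff] at *; tauto

-- generic fold reshaping
theorem pv_foldl_flatMap {α β γ : Type} (f : γ → β → γ) (h : α → List β) (l : List α) (g : γ) :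
    l.foldl (fun g x => (h x).foldl f g) g = (l.flatMap h).foldl f g := by
  induction l generalizing g with
  | nil => rfl
  | cons x t ih => simp [List.flatMap_cons, List.foldl_append, ih]

theorem pv_foldl_filterMap {α β γ : Type} (f : γ → β → γ) (h : α → Option β) (l : List α) (g : γ) :
    l.foldl (fun g x => match h x with | some p => f g p | none => g) g =
      (l.filterMap h).foldl f g := by
  induction l generalizing g with
  | nil => rfl
  | cons x t ih => cases hx : h x <;> simp [hx, ih]

theorem pv_inner2 (rows cols i j : Nat) (out : List (List Int)) :
    ([-1, 0, 1] : List Int).foldl (fun out di =>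
      ([-1, 0, 1] : List Int).foldl (fun out dj =>
        if 0 ≤ (i : Int) + di ∧ (i : Int) + di < (rows : Int) ∧
           0 ≤ (j : Int) + dj ∧ (j : Int) + dj < (cols : Int) then
          pvSet1 out (((i : Int) + di).toNat, ((j : Int) + dj).toNat)
        else out) out) out = pvApply (pvNbrs rows cols i j) out := by
  unfold pvNbrs pvApply
  rw [← pv_foldl_flatMap]
  apply PySem.List.foldl_congr_mem
  intro out' di _
  rw [← pv_foldl_filterMap]
  apply PySem.List.foldl_congr_mem
  intro out'' dj _
  by_cases hc : 0 ≤ (i : Int) + di ∧ (i : Int) + di < (rows : Int) ∧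
      0 ≤ (j : Int) + dj ∧ (j : Int) + dj < (cols : Int)
  · simp only [if_pos hc]
  · simp only [if_neg hc]

theorem pv_transform_eq_apply (grid : List (List Int)) :
    transform grid = pvApply (pvPos grid) (pvZeros grid) := by
  show (List.range grid.length).foldl _ _ = _
  unfold pvPos pvApply
  rw [← pv_foldl_flatMap]
  apply PySem.List.foldl_congr_mem
  intro out i _
  rw [← pv_foldl_flatMap]
  apply PySem.List.foldl_congr_mem
  intro out' j _
  by_cases hg : (grid.getD i []).getD j 0 = 5
  · rw [if_pos hg, if_pos (show pvEnt grid i j = 5 from hg)]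
    exact pv_inner2 _ _ i j out'
  · rw [if_neg hg, if_neg (show ¬ pvEnt grid i j = 5 from hg)]
    rfl

theorem pv_mem_pos (grid : List (List Int)) (a b : Nat)
    (ha : a < grid.length) (hb : b < (grid.head?.getD []).length) :
    ((a, b) ∈ pvPos grid) ↔
      ∃ i, (a - 1 ≤ i ∧ i < min (a + 2) grid.length) ∧
        ∃ j, (b - 1 ≤ j ∧ j < min (b + 2) (grid.head?.getD []).length) ∧ pvEnt grid i j = 5 := by
  unfold pvPos
  simp only [List.mem_flatMap, List.mem_range]
  constructor
  · rintro ⟨i, hi, j, hj, hmem⟩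
    by_cases hg : pvEnt grid i j = 5
    · rw [if_pos hg] at hmem
      unfold pvNbrs at hmem
      simp only [List.mem_flatMap, List.mem_filterMap] at hmem
      obtain ⟨di, hdi, dj, hdj, heq⟩ := hmem
      have hdi' : di = -1 ∨ di = 0 ∨ di = 1 := by simpa using hdi
      have hdj' : dj = -1 ∨ dj = 0 ∨ dj = 1 := by simpa using hdj
      split at heq
      · rename_i hbnd
        obtain ⟨h1, h2, h3, h4⟩ := hbnd
        rw [Option.some_inj, Prod.mk.injEq] at heq
        obtain ⟨e1, e2⟩ := heq
        refine ⟨i, ⟨by omega, by omega⟩, j, ⟨by omega, by omega⟩, hg⟩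
      · cases heq
    · rw [if_neg hg] at hmem
      exact absurd hmem (List.not_mem_nil)
  · rintro ⟨i, ⟨hi1, hi2⟩, j, ⟨hj1, hj2⟩, hg⟩
    refine ⟨i, by omega, j, by omega, ?_⟩
    rw [if_pos hg]
    unfold pvNbrs
    simp only [List.mem_flatMap, List.mem_filterMap]
    refine ⟨(a : Int) - i, ?_, (b : Int) - j, ?_, ?_⟩
    · have : (a : Int) - i = -1 ∨ (a : Int) - i = 0 ∨ (a : Int) - i = 1 := by omega
      rcases this with h | h | h <;> simp [h]
    · have : (b : Int) - j = -1 ∨ (b : Int) - j = 0 ∨ (b : Int) - j = 1 := by omega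
      rcases this with h | h | h <;> simp [h]
    · rw [if_pos (by refine ⟨by omega, by omega, by omega, by omega⟩)]
      rw [Option.some_inj, Prod.mk.injEq]
      exact ⟨by omega, by omega⟩

theorem pv_getElem_eq_getD (g : List (List Int)) (a : Nat) (h : a < g.length) :
    g[a] = g.getD a [] := by
  rw [List.getD_eq_getElem?_getD, List.getElem?_eq_getElem h]; rfl

theorem pv_getElem2 (g : List (List Int)) (a b : Nat) (h1 : a < g.length)
    (hb : b < (g[a]'h1).length) : (g[a]'h1)[b]'hb = (g.getD a []).getD b 0 := by
  simp [List.getD_eq_getElem?_getD, h1, hb]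

theorem pv_main (grid : List (List Int)) : transform grid = transform_alt grid := by
  rw [pv_transform_eq_apply]
  have hzl : (pvZeros grid).length = grid.length := by simp [pvZeros]
  have hzrow : ∀ a, a < grid.length →
      (pvZeros grid).getD a [] = List.replicate (grid.head?.getD []).length 0 := by
    intro a h
    simp [pvZeros, List.getD_eq_getElem?_getD, h]
  have haltl : (transform_alt grid).length = grid.length := by simp [transform_alt]
  apply List.ext_getElem
  · rw [pv_len_apply, hzl, haltl]
  intro a h1 h2
  have ha : a < grid.length := by rwa [pv_len_apply, hzl] at h1
  have hrowlen : ((pvApply (pvPos grid) (pvZeros grid)).getD a []).length =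
      (grid.head?.getD []).length := by
    rw [pv_rowlen_apply, hzrow a ha]; simp
  apply List.ext_getElem
  · rw [pv_getElem_eq_getD _ _ h1, hrowlen]
    simp [transform_alt, List.getElem_map, List.getElem_range]
  intro b hb1 hb2
  have hbcols : b < (grid.head?.getD []).length := by
    rwa [pv_getElem_eq_getD _ _ h1, hrowlen] at hb1
  -- left side: entry of the scatter result
  rw [pv_getElem2 _ _ _ h1 hb1]
  have hL : ((pvApply (pvPos grid) (pvZeros grid)).getD a []).getD b 0 =
      if (a, b) ∈ pvPos grid then 1 else 0 := by
    have := pv_ent_apply (pvPos grid) (pvZeros grid) a b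
    unfold pvEnt at this
    rw [this, hzl, hzrow a ha]
    by_cases hm : (a, b) ∈ pvPos grid
    · simp [hm, ha, hbcols]
    · rw [if_neg (by simp [hm]), if_neg hm]
      simp [List.getD_eq_getElem?_getD, hbcols]
  rw [hL]
  have hcond : ((List.range' (a - 1) (min (a + 2) grid.length - (a - 1))).any (fun i =>
      (List.range' (b - 1) (min (b + 2) (grid.head?.getD []).length - (b - 1))).any (fun j =>
        (grid.getD i []).getD j 0 == 5))) = true ↔ (a, b) ∈ pvPos grid := by
    constructor
    · intro hany
      rw [List.any_eq_true] at hany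
      obtain ⟨i, hi, hany2⟩ := hany
      rw [List.any_eq_true] at hany2
      obtain ⟨j, hj, hg⟩ := hany2
      rw [List.mem_range'_1] at hi hj
      refine (pv_mem_pos grid a b ha hbcols).mpr
        ⟨i, ⟨hi.1, by omega⟩, j, ⟨hj.1, by omega⟩, by simpa using hg⟩
    · intro hm
      obtain ⟨i, ⟨hi1, hi2⟩, j, ⟨hj1, hj2⟩, hg⟩ := (pv_mem_pos grid a b ha hbcols).mp hm
      rw [List.any_eq_true]
      refine ⟨i, List.mem_range'_1.mpr ⟨hi1, by omega⟩, ?_⟩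
      rw [List.any_eq_true]
      refine ⟨j, List.mem_range'_1.mpr ⟨hj1, by omega⟩, ?_⟩
      unfold pvEnt at hg
      simp only [List.getD_eq_getElem?_getD] at hg
      simp [List.getD_eq_getElem?_getD, hg]
  simp only [transform_alt, List.getElem_map, List.getElem_range]
  by_cases hm : (a, b) ∈ pvPos grid
  · rw [if_pos hm, if_pos (hcond.mpr hm)]
  · rw [if_neg hm, if_neg (fun h => hm (hcond.mp h))]

-- ===== VERDICT (by name: the statement is the Claim_ definition above) =====
theorem transform_spec : Claim_equal_transform := by
  intro grid _ _
  exact pv_main grid
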